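-- pv_equiv track=rewrite | github.com/WitoldTrzeciakowski/Project_AAC | spectral_distance.py | can_be_isomorphic
-- ===== SOURCE A (Python) =====
-- def can_be_isomorphic(M1, M2):
--     # wielkosc grafu
--     if len(M1) != len(M2):
--         return False
--     # degree sequence
--     M1_degs = sorted([sum(row) for row in M1])
--     M2_degs = sorted([sum(row) for row in M2])
--     if M1_degs != M2_degs:
--         return False
--     return True
-- ===== SOURCE B (Python) =====
-- def can_be_isomorphic(M1, M2):
--     if len(M1) != len(M2):
--         return False
--     # one shared degree histogram: +1 for M1's rows, -1 for M2's rows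
--     hist = {}
--     for row in M1:
--         d = sum(row)
--         hist[d] = hist.get(d, 0) + 1
--     for row in M2:
--         d = sum(row)
--         hist[d] = hist.get(d, 0) - 1
--     return all(v == 0 for v in hist.values())
-- ===== Notes on version B (the rewrite author's own statement) =====
-- stated objective: alternative
-- what changed: Replaces the two sorts and ordered-list comparison by a single degree histogram (+1 per M1 row, -1 per M2 row) that is checked to be all zeros.
import Mathlib
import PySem

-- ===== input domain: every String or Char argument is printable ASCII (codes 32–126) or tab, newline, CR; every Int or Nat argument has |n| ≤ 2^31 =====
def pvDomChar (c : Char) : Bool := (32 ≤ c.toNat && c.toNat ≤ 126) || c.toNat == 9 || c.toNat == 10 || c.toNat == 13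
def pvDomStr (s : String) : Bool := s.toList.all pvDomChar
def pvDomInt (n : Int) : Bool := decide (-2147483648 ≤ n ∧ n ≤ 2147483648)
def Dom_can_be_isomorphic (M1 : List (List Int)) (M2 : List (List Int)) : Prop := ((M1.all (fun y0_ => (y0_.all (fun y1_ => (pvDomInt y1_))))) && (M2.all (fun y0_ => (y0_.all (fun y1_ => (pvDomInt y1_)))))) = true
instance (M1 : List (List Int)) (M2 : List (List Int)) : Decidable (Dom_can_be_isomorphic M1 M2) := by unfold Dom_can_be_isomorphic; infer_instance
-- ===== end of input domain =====

-- B replaces A's sort-both-degree-sequences-and-compare by one shared degree histogram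
-- (+1 per M1 row, -1 per M2 row) checked to be all zeros (objective: alternative).

-- ===== PORT A =====
def can_be_isomorphic (M1 : List (List Int)) (M2 : List (List Int)) : Bool :=
  if M1.length ≠ M2.length then false
  else
    let M1_degs : List Int := PySem.List.sorted (M1.map (fun row => row.foldl (· + ·) 0)) (fun x => x) false
    let M2_degs : List Int := PySem.List.sorted (M2.map (fun row => row.foldl (· + ·) 0)) (fun x => x) false
    if M1_degs ≠ M2_degs then false else true

-- ===== PORT B =====
def can_be_isomorphic_alt (M1 : List (List Int)) (M2 : List (List Int)) : Bool :=
  if M1.length ≠ M2.length then false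
  else
    let h1 := M1.foldl (fun d row => d.modify (row.foldl (· + ·) 0) 0 (· + 1)) (PySem.Dict.empty : PySem.Dict Int Int)
    let h2 := M2.foldl (fun d row => d.modify (row.foldl (· + ·) 0) 0 (· - 1)) h1
    h2.values.all (fun v => v == 0)

-- ===== PRECONDITION & SPEC =====
def Spec_can_be_isomorphic (M1 : List (List Int)) (M2 : List (List Int)) (out : Bool) : Prop := out = can_be_isomorphic_alt M1 M2
instance (M1 : List (List Int)) (M2 : List (List Int)) (out : Bool) : Decidable (Spec_can_be_isomorphic M1 M2 out) := by unfold Spec_can_be_isomorphic; infer_instance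

-- ===== CLAIM (what is proved, stated in full; the proofs are below) =====
def Claim_equal_can_be_isomorphic : Prop := ∀ (M1 : List (List Int)) (M2 : List (List Int)), Dom_can_be_isomorphic M1 M2 → Spec_can_be_isomorphic M1 M2 (can_be_isomorphic M1 M2)

-- ===== LEMMAS AND PROOFS =====

theorem getD_foldl_modify_sub_one (l : List Int) (d : PySem.Dict Int Int) (v : Int) :
    (l.foldl (fun d x => d.modify x 0 (· - 1)) d).getD v 0 = d.getD v 0 - l.count v := by
  induction l generalizing d with
  | nil => simp
  | cons a t ih =>
    rw [List.foldl_cons, ih]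
    by_cases h : v = a <;> simp [PySem.Dict.getD_modify, h, List.count_cons] <;> omega

-- final histogram lookup = count in M1's degree list minus count in M2's degree list
theorem hist_getD (M1 M2 : List (List Int)) (v : Int) :
    ((M2.foldl (fun d row => d.modify (row.foldl (· + ·) 0) 0 (· - 1))
        (M1.foldl (fun d row => d.modify (row.foldl (· + ·) 0) 0 (· + 1)) (PySem.Dict.empty : PySem.Dict Int Int))).getD v 0)
    = ((M1.map (fun row => row.foldl (· + ·) 0)).count v : Int)
      - ((M2.map (fun row => row.foldl (· + ·) 0)).count v : Int) := by
  rw [show (M2.foldl (fun d row => d.modify (row.foldl (· + ·) 0) 0 (· - 1))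
        (M1.foldl (fun d row => d.modify (row.foldl (· + ·) 0) 0 (· + 1)) (PySem.Dict.empty : PySem.Dict Int Int)))
      = ((M2.map (fun row : List Int => row.foldl (· + ·) 0)).foldl (fun d x => d.modify x 0 (· - 1))
          ((M1.map (fun row : List Int => row.foldl (· + ·) 0)).foldl (fun d x => d.modify x 0 (· + 1))
            (PySem.Dict.empty : PySem.Dict Int Int)))
      from by rw [List.foldl_map, List.foldl_map],
    getD_foldl_modify_sub_one, PySem.Dict.getD_foldl_modify_add_one]
  simp

theorem hist_keys_nodup (M1 M2 : List (List Int)) :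
    ((M2.foldl (fun d row => d.modify (row.foldl (· + ·) 0) 0 (· - 1))
        (M1.foldl (fun d row => d.modify (row.foldl (· + ·) 0) 0 (· + 1)) (PySem.Dict.empty : PySem.Dict Int Int))).keys).Nodup := by
  apply PySem.Dict.nodup_keys_foldl_modify_key
  apply PySem.Dict.nodup_keys_foldl_modify_key
  exact PySem.Dict.nodup_keys_empty

theorem mem_hist_keys (M1 M2 : List (List Int)) (k : Int) :
    k ∈ ((M2.foldl (fun d row => d.modify (row.foldl (· + ·) 0) 0 (· - 1))
        (M1.foldl (fun d row => d.modify (row.foldl (· + ·) 0) 0 (· + 1)) (PySem.Dict.empty : PySem.Dict Int Int))).keys)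
    ↔ k ∈ M1.map (fun row => row.foldl (· + ·) 0) ∨ k ∈ M2.map (fun row => row.foldl (· + ·) 0) := by
  rw [PySem.Dict.keys_foldl_modify_key, PySem.Dict.keys_foldl_modify_key]
  simp [PySem.Set.mem_update, PySem.Dict.keys_empty]

theorem main_iff (M1 M2 : List (List Int)) :
    (PySem.List.sorted (M1.map (fun row => row.foldl (· + ·) 0)) (fun x => x) false
      = PySem.List.sorted (M2.map (fun row => row.foldl (· + ·) 0)) (fun x => x) false)
    ↔ (((M2.foldl (fun d row => d.modify (row.foldl (· + ·) 0) 0 (· - 1))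
          (M1.foldl (fun d row => d.modify (row.foldl (· + ·) 0) 0 (· + 1)) (PySem.Dict.empty : PySem.Dict Int Int))).values.all
            (fun v => v == 0)) = true) := by
  set l1 := M1.map (fun row => row.foldl (· + ·) 0) with hl1
  set l2 := M2.map (fun row => row.foldl (· + ·) 0) with hl2
  set h := M2.foldl (fun d row => d.modify (row.foldl (· + ·) 0) 0 (· - 1))
          (M1.foldl (fun d row => d.modify (row.foldl (· + ·) 0) 0 (· + 1)) (PySem.Dict.empty : PySem.Dict Int Int)) with hh
  rw [PySem.List.sorted_id_eq_sorted_id_iff_perm, List.perm_iff_count,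
      PySem.Dict.values_eq_map_keys h (hist_keys_nodup M1 M2) 0]
  simp only [List.all_map, Function.comp, List.all_eq_true, beq_iff_eq]
  constructor
  · intro hcnt k _
    rw [hh, hist_getD M1 M2 k, ← hl1, ← hl2, hcnt k]
    ring
  · intro hz v
    by_cases hk : v ∈ h.keys
    · have := hz v hk
      rw [hh, hist_getD M1 M2 v, ← hl1, ← hl2] at this
      omega
    · rw [hh, mem_hist_keys M1 M2 v, ← hl1, ← hl2] at hk
      rw [not_or] at hk
      rw [List.count_eq_zero_of_not_mem hk.1, List.count_eq_zero_of_not_mem hk.2]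

-- ===== VERDICT (by name: the statement is the Claim_ definition above) =====
theorem can_be_isomorphic_spec : Claim_equal_can_be_isomorphic := by
  intro M1 M2 _
  unfold Spec_can_be_isomorphic can_be_isomorphic can_be_isomorphic_alt
  by_cases hlen : M1.length ≠ M2.length
  · simp [hlen]
  · by_cases heq : PySem.List.sorted (M1.map (fun row => row.foldl (· + ·) 0)) (fun x => x) false
      = PySem.List.sorted (M2.map (fun row => row.foldl (· + ·) 0)) (fun x => x) false
    · simp [hlen, heq, ((main_iff M1 M2).mp heq)]
    · have hall : ((M2.foldl (fun d row => d.modify (row.foldl (· + ·) 0) 0 (· - 1))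
          (M1.foldl (fun d row => d.modify (row.foldl (· + ·) 0) 0 (· + 1)) (PySem.Dict.empty : PySem.Dict Int Int))).values.all
            (fun v => v == 0)) = false :=
        Bool.eq_false_iff.mpr (fun hx => heq ((main_iff M1 M2).mpr hx))
      simp [hlen, heq, hall]
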